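-- pv_equiv track=rewrite | github.com/chenyang1999/MyComputerCollegeCourses | CS116课后题/06/a06_interface/a06q3.py | pd
-- ===== SOURCE A (Python) =====
-- def pd(L,prime):
--   if L in prime:
--     return True
--   ans=False
--   if L[:1] in prime:ans=ans|pd(L[1:], prime)
--   if L[:2] in prime:ans=ans|pd(L[1:], prime)
--   if L[:3] in prime:ans=ans|pd(L[1:], prime)
--   if L[:4] in prime:ans=ans|pd(L[1:], prime)
--   return ans
-- ===== SOURCE B (Python) =====
-- def pd(L, prime):
--     # single backward pass over suffixes, set lookup instead of list scan
--     ps = set(prime)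
--     suffix = ""
--     res = "" in ps
--     for c in reversed(L):
--         suffix = c + suffix
--         res = (suffix in ps) or (any(suffix[:k] in ps for k in (1, 2, 3, 4)) and res)
--     return res
-- ===== Notes on version B (the rewrite author's own statement) =====
-- stated objective: alternative
-- what changed: Replaced A's 4-way recursion (all four calls recurse on the same L[1:]) with a single backward loop over the suffixes carrying one boolean, with prime turned into a set for lookups.
import Mathlib
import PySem

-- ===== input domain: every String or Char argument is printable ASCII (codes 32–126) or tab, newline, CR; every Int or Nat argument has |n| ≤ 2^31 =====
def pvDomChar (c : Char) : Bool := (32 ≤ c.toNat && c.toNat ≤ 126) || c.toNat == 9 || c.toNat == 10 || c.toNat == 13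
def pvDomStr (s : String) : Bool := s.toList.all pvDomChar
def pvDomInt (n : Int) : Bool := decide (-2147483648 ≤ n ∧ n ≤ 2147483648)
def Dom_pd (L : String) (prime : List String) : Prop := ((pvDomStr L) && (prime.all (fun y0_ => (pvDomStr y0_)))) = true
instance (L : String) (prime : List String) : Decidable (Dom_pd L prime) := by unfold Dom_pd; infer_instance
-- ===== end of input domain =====

-- B replaces A's 4-way recursion (all four recursive calls are on the same L[1:])
-- by one backward pass over the suffixes with a set lookup (alternative algorithm).

-- ===== PORT A =====
-- A, step for step, over List Char (L[:k] = take k, L[1:] = tail; 'in prime' = prime.contains).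
-- In the [] arm every slice L[:k] is "" and the first branch already ruled "" out of prime,
-- so no recursive call fires in Python and the answer is the untouched ans = False.
def pdA (prime : List String) : List Char → Bool
  | [] =>
    if prime.contains (String.ofList []) then true
    else false
  | c :: rest =>
    if prime.contains (String.ofList (c :: rest)) then true
    else
      let ans := false
      let ans := if prime.contains (String.ofList ((c :: rest).take 1)) then ans || pdA prime rest else ans
      let ans := if prime.contains (String.ofList ((c :: rest).take 2)) then ans || pdA prime rest else ans
      let ans := if prime.contains (String.ofList ((c :: rest).take 3)) then ans || pdA prime rest else ans
      let ans := if prime.contains (String.ofList ((c :: rest).take 4)) then ans || pdA prime rest else ans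
      ans

def pd (L : String) (prime : List String) : Bool := pdA prime L.toList

-- ===== PORT B =====
-- B, step for step: ps = set(prime); fold over reversed(L) carrying (suffix, res).
def pd_alt (L : String) (prime : List String) : Bool :=
  let ps := PySem.Set.ofList prime
  (L.toList.reverse.foldl
    (fun (st : List Char × Bool) c =>
      let suffix := c :: st.1
      (suffix,
        PySem.Set.contains ps (String.ofList suffix) ||
          (([1, 2, 3, 4].any fun k => PySem.Set.contains ps (String.ofList (suffix.take k))) && st.2)))
    ([], PySem.Set.contains ps (String.ofList []))).2

-- ===== PRECONDITION & SPEC =====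
def Spec_pd (L : String) (prime : List String) (out : Bool) : Prop := out = pd_alt L prime
instance (L : String) (prime : List String) (out : Bool) : Decidable (Spec_pd L prime out) := by unfold Spec_pd; infer_instance

-- ===== CLAIM (what is proved, stated in full; the proofs are below) =====
def Claim_equal_pd : Prop := ∀ (L : String) (prime : List String), Dom_pd L prime → Spec_pd L prime (pd L prime)

-- ===== LEMMAS AND PROOFS =====

lemma set_contains_ofList (xs : List String) (x : String) :
    PySem.Set.contains (PySem.Set.ofList xs) x = xs.contains x := by
  by_cases h : x ∈ xs <;> simp [h]

-- A's let-chain collapses: all four recursive calls return the same value r.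
lemma chain_eq (a b c d r : Bool) :
    (let ans := false
     let ans := if a then ans || r else ans
     let ans := if b then ans || r else ans
     let ans := if c then ans || r else ans
     let ans := if d then ans || r else ans
     ans) = ((a || b || c || d) && r) := by
  cases a <;> cases b <;> cases c <;> cases d <;> cases r <;> rfl

-- loop invariant of B's fold: after consuming reversed l, state = (l, pdA prime l)
lemma fold_inv (prime : List String) (l : List Char) :
    l.reverse.foldl
      (fun (st : List Char × Bool) c =>
        let suffix := c :: st.1
        (suffix,
          PySem.Set.contains (PySem.Set.ofList prime) (String.ofList suffix) ||
            (([1, 2, 3, 4].any fun k =>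
                PySem.Set.contains (PySem.Set.ofList prime) (String.ofList (suffix.take k))) && st.2)))
      ([], PySem.Set.contains (PySem.Set.ofList prime) (String.ofList []))
    = (l, pdA prime l) := by
  induction l with
  | nil =>
    simp [pdA]
  | cons c rest ih =>
    rw [List.reverse_cons, List.foldl_append, ih]
    simp only [List.foldl_cons, List.foldl_nil]
    refine Prod.ext rfl ?_
    simp only [set_contains_ofList, List.any_cons, List.any_nil]
    rw [pdA]
    rw [chain_eq]
    cases h : prime.contains (String.ofList (c :: rest)) <;> simp [Bool.or_assoc]

-- ===== VERDICT (by name: the statement is the Claim_ definition above) =====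
theorem pd_spec : Claim_equal_pd := by
  intro L prime _
  unfold Spec_pd pd pd_alt
  exact (congrArg Prod.snd (fold_inv prime L.toList)).symm
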